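-- pv_equiv track=rewrite | github.com/jakobkhansen/master-thesis | sem3/suffixarraycoding/linearpython/suffixarray.py | get_types_and_lms_characters
-- ===== SOURCE A (Python) =====
-- def get_types_and_lms_characters(string):
--     types = ['']*len(string)
--     lms_chars = []
--     lms_strings = {len(string)-1: "$"}
--
--     types[-1] = "S"
--
--     for i in range(len(string)-2, -1, -1):
--         c = string[i]
--
--         # Determine type
--         if string[i] == string[i+1]:
--             types[i] = types[i+1]
--         else:
--             types[i] = 'L' if string[i] > string[i+1] else 'S'
--
--         # Determine if LMS
--         if types[i] == 'L' and types[i+1] == 'S':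
--             lms_chars.append(i+1)
--             if len(lms_chars) > 1:
--                 lms_strings[i+1] = (string[lms_chars[-1]:lms_chars[-2]+1])
--
--     return types, lms_chars, lms_strings
-- ===== SOURCE B (Python) =====
-- def get_types_and_lms_characters(string):
--     n = len(string)
--     # Pass 1 (backward): suffix types only, built back-to-front with a carried type.
--     rev = []                      # types for positions n-2 .. 0, in that order
--     t = 'S'                       # type of the character to the right
--     for i in range(n - 2, -1, -1):
--         if string[i] != string[i + 1]:
--             t = 'L' if string[i] > string[i + 1] else 'S'
--         rev.append(t)
--     types = (rev[::-1] + ['S']) if n else []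
--     # Pass 2 (forward): LMS positions in increasing order.
--     lms = [p for p in range(1, n) if types[p] == 'S' and types[p - 1] == 'L']
--     # Pass 3: substrings from consecutive LMS pairs, inserted in decreasing key order.
--     lms_strings = {n - 1: '$'}
--     for j in range(len(lms) - 2, -1, -1):
--         lms_strings[lms[j]] = string[lms[j]:lms[j + 1] + 1]
--     return types, lms[::-1], lms_strings
-- ===== Notes on version B (the rewrite author's own statement) =====
-- stated objective: simpler
-- what changed: A's single fused backward loop (preallocated array mutated by index, LMS list and substring dict built on the fly from negative-index history) is replaced by three short passes: a backward types-only pass carrying the current type, a forward scan collecting LMS positions in increasing order, and a final loop deriving each substring from consecutive LMS pairs.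
import Mathlib
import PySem

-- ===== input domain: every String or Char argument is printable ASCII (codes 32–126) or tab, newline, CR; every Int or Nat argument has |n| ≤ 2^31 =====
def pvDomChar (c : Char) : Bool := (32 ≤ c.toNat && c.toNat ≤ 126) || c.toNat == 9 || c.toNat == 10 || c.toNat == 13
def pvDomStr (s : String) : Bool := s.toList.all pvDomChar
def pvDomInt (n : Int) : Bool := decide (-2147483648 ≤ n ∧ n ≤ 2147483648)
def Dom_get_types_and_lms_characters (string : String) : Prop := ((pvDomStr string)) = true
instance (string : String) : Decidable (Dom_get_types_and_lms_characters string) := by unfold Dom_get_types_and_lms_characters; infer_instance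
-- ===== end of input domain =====

-- B replaces A's single fused backward loop by three short passes (types only, then a forward
-- LMS scan, then the substring dict from consecutive LMS pairs); objective: simpler decomposition.

-- ===== PORT A =====
-- string[i] as a Char; exact whenever -len ≤ i < len (every index both programs use on non-empty
-- input is in range; the empty string, where Python raises, is outside Pre_)
def pvChar (s : List Char) (i : Int) : Char := PySem.List.pyGetD s i ' '

-- xs[i] = v ; exact for in-range i (-len ≤ i < len), which Pre_ guarantees here
def pySet {α : Type} (xs : List α) (i : Int) (v : α) : List α :=
  if i < 0 then xs.set (xs.length - (-i).toNat) v else xs.set i.toNat v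

-- the body of A's for-loop (state: types, lms_chars, lms_strings)
def pvAStep (string : String) (st : List String × List Int × PySem.Dict Int String) (i : Int) :
    List String × List Int × PySem.Dict Int String :=
  let s := string.toList
  let types := st.1
  let lms_chars := st.2.1
  let lms_strings := st.2.2
  let _c := pvChar s i
  let ti : String :=
    if pvChar s i = pvChar s (i + 1) then PySem.List.pyGetD types (i + 1) ""
    else if pvChar s (i + 1) < pvChar s i then "L" else "S"
  let types := pySet types i ti
  if PySem.List.pyGetD types i "" = "L" ∧ PySem.List.pyGetD types (i + 1) "" = "S" then
    let lms_chars := lms_chars ++ [i + 1]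
    let lms_strings :=
      if 1 < lms_chars.length then
        lms_strings.insert (i + 1)
          (PySem.Str.slice string (some (PySem.List.pyGetD lms_chars (-1) 0))
            (some (PySem.List.pyGetD lms_chars (-2) 0 + 1)))
      else lms_strings
    (types, lms_chars, lms_strings)
  else (types, lms_chars, lms_strings)

def get_types_and_lms_characters (string : String) : List String × List Int × (List (Int × String)) :=
  let s := string.toList
  let n : Int := (s.length : Int)
  let types : List String := PySem.List.pyRepeat [""] n
  let lms_chars : List Int := []
  let lms_strings : PySem.Dict Int String := PySem.Dict.ofList [(n - 1, "$")]
  let types := pySet types (-1) "S"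
  let res := (PySem.List.pyRange (n - 2) (-1) (-1)).foldl (pvAStep string) (types, lms_chars, lms_strings)
  (res.1, res.2.1, res.2.2.items)

-- ===== PORT B =====
-- pass 1 body: backward, types only, carried type t
def pvBStep1 (s : List Char) (st : List String × String) (i : Int) : List String × String :=
  let t := if pvChar s i ≠ pvChar s (i + 1) then (if pvChar s (i + 1) < pvChar s i then "L" else "S") else st.2
  (st.1 ++ [t], t)

-- pass 2 body: forward scan collecting LMS positions in increasing order
def pvBStep2 (types : List String) (acc : List Int) (p : Int) : List Int :=
  if PySem.List.pyGetD types p "" = "S" ∧ PySem.List.pyGetD types (p - 1) "" = "L" then acc ++ [p] else acc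

-- pass 3 body: substring for the consecutive LMS pair (lms[j], lms[j+1])
def pvBStep3 (string : String) (lms : List Int) (d : PySem.Dict Int String) (j : Int) :
    PySem.Dict Int String :=
  d.insert (PySem.List.pyGetD lms j 0)
    (PySem.Str.slice string (some (PySem.List.pyGetD lms j 0)) (some (PySem.List.pyGetD lms (j + 1) 0 + 1)))

def get_types_and_lms_characters_alt (string : String) : List String × List Int × (List (Int × String)) :=
  let s := string.toList
  let n : Int := (s.length : Int)
  let p1 := (PySem.List.pyRange (n - 2) (-1) (-1)).foldl (pvBStep1 s) ([], "S")
  let types : List String := if n ≠ 0 then p1.1.reverse ++ ["S"] else []   -- rev[::-1] + ['S']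
  let lms : List Int := (PySem.List.pyRange 1 n 1).foldl (pvBStep2 types) []
  let lms_strings := (PySem.List.pyRange ((lms.length : Int) - 2) (-1) (-1)).foldl
      (pvBStep3 string lms) (PySem.Dict.ofList [(n - 1, "$")])
  (types, lms.reverse, lms_strings.items)

-- ===== PRECONDITION & SPEC =====
-- Pre_ excludes only the empty string, on which A raises IndexError at its initial types[-1] assignment.
def Pre_get_types_and_lms_characters (string : String) : Prop := string ≠ ""
instance (string : String) : Decidable (Pre_get_types_and_lms_characters string) := by
  unfold Pre_get_types_and_lms_characters; infer_instance
def pvWitness_get_types_and_lms_characters : String := "ab"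

def Spec_get_types_and_lms_characters (string : String) (out : List String × List Int × (List (Int × String))) : Prop := out = get_types_and_lms_characters_alt string
instance (string : String) (out : List String × List Int × (List (Int × String))) : Decidable (Spec_get_types_and_lms_characters string out) := by unfold Spec_get_types_and_lms_characters; infer_instance

-- ===== CLAIM (what is proved, stated in full; the proofs are below) =====
def Claim_equal_get_types_and_lms_characters : Prop := ∀ (string : String), Dom_get_types_and_lms_characters string → Pre_get_types_and_lms_characters string → Spec_get_types_and_lms_characters string (get_types_and_lms_characters string)
-- ===== LEMMAS AND PROOFS =====

-- the canonical type list: pvT s lists the suffix type ("S"/"L") of every position of s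
def pvT : List Char → List String
  | [] => []
  | [_] => ["S"]
  | a :: b :: r => (if a = b then (pvT (b :: r)).headD "S" else if b < a then "L" else "S") :: pvT (b :: r)

-- LMS positions, increasing, as naturals and as integers
def pvIsLMS (s : List Char) (p : Nat) : Bool :=
  decide (p ≠ 0) && decide ((pvT s).getD p "" = "S") && decide ((pvT s).getD (p - 1) "" = "L")
def pvInc (s : List Char) : List Nat := (List.range s.length).filter (pvIsLMS s)
def pvIncZ (s : List Char) : List Int := (pvInc s).map (fun p : Nat => (p : Int))
def pvPairs (string : String) : List (Int × String) :=
  ((pvIncZ string.toList).zip (pvIncZ string.toList).tail).map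
    (fun ab => (ab.1, PySem.Str.slice string (some ab.1) (some (ab.2 + 1))))
def pvCanon (string : String) : List String × List Int × (List (Int × String)) :=
  (pvT string.toList, (pvIncZ string.toList).reverse,
   ((string.toList.length : Int) - 1, "$") :: (pvPairs string).reverse)


-- basic facts about pvT and the LMS position list
theorem pvT_length (s : List Char) : (pvT s).length = s.length := by
  match s with
  | [] => rfl
  | [_] => rfl
  | a :: b :: r => simp [pvT, pvT_length (b :: r)]

theorem pvT_last (s : List Char) (h : s ≠ []) : (pvT s).getD (s.length - 1) "" = "S" := by
  match s with
  | [_] => rfl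
  | a :: b :: r =>
    have := pvT_last (b :: r) (by simp)
    simp [pvT, List.getD] at this ⊢
    simpa using this

theorem pvT_getD (s : List Char) (i : Nat) (h : i + 1 < s.length) :
    (pvT s).getD i "" = if s.getD i ' ' = s.getD (i + 1) ' ' then (pvT s).getD (i + 1) ""
      else if s.getD (i + 1) ' ' < s.getD i ' ' then "L" else "S" := by
  match s, i with
  | a :: b :: r, 0 =>
    by_cases hab : a = b
    · simp [pvT, List.getD, hab]
      cases r with
      | nil => rfl
      | cons c r' => rfl
    · simp [pvT, List.getD, hab]
  | a :: b :: r, (i+1) =>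
    have := pvT_getD (b :: r) i (by simpa using h)
    simpa [pvT, List.getD] using this

-- sorted-list pair lemma: consecutive zip pairs increase
theorem zip_tail_lt (l : List Nat) (hl : l.Pairwise (· < ·)) :
    ∀ ab ∈ l.zip l.tail, ab.1 < ab.2 := by
  induction l with
  | nil => simp
  | cons x t ih =>
    cases t with
    | nil => simp
    | cons b t' =>
      intro ab hab
      simp only [List.tail_cons, List.zip_cons_cons, List.mem_cons] at hab
      rcases hab with rfl | hab
      · exact (List.pairwise_cons.mp hl).1 b (by simp)
      · exact ih (List.pairwise_cons.mp hl).2 ab (by simpa using hab)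

theorem filter_step_mem (l : List Nat) (j : Nat) (hl : l.Pairwise (· < ·)) (hm : j + 1 ∈ l) :
    l.filter (fun p => decide (j < p)) = (j + 1) :: l.filter (fun p => decide (j + 1 < p)) := by
  induction l with
  | nil => simp at hm
  | cons x t ih =>
    rcases List.pairwise_cons.mp hl with ⟨hx, ht⟩
    rcases List.mem_cons.mp hm with rfl | hmt
    · have h1 : ∀ p ∈ t, j < p := fun p hp => by have := hx p hp; omega
      have h2 : t.filter (fun p => decide (j < p)) = t := List.filter_eq_self.mpr (by simpa using h1)
      have h3 : t.filter (fun p => decide (j + 1 < p)) = t := List.filter_eq_self.mpr (by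
        intro p hp; simpa using hx p hp)
      simp [h2, h3]
    · have hxlt : x < j + 1 := by
        by_contra hge
        have := hx _ hmt
        omega
      have h1 : ¬ j < x := by omega
      have h2 : ¬ j + 1 < x := by omega
      simp only [List.filter_cons, h1, h2, decide_eq_true_eq, ite_false]
      simpa using ih ht hmt
theorem filter_step_not_mem (l : List Nat) (j : Nat) (hm : j + 1 ∉ l) :
    l.filter (fun p => decide (j < p)) = l.filter (fun p => decide (j + 1 < p)) := by
  apply List.filter_congr
  intro p hp
  have : p ≠ j + 1 := fun h => hm (h ▸ hp)
  simp; omega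

theorem zip_filter_fst (l : List Nat) (j : Nat) (hl : l.Pairwise (· < ·)) :
    (l.zip l.tail).filter (fun ab => decide (j < ab.1)) =
      (l.filter (fun p => decide (j < p))).zip (l.filter (fun p => decide (j < p))).tail := by
  induction l with
  | nil => simp
  | cons x t ih =>
    rcases List.pairwise_cons.mp hl with ⟨hx, ht⟩
    by_cases hjx : j < x
    · have h2 : t.filter (fun p => decide (j < p)) = t := List.filter_eq_self.mpr (by
        intro p hp; have := hx p hp; simp; omega)
      cases t with
      | nil => simp [hjx]
      | cons b t' =>
        have step : ((x :: b :: t').zip (b :: t')).filter (fun ab => decide (j < ab.1)) =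
            (x, b) :: (((b :: t').zip t').filter (fun ab => decide (j < ab.1))) := by
          simp [hjx]
        calc ((x :: b :: t').zip (x :: b :: t').tail).filter (fun ab => decide (j < ab.1))
            = (x, b) :: (((b :: t').zip (b :: t').tail).filter (fun ab => decide (j < ab.1))) := by
              simpa using step
          _ = (x, b) :: (((b :: t').filter (fun p => decide (j < p))).zip ((b :: t').filter (fun p => decide (j < p))).tail) := by
              rw [ih ht]
          _ = ((x :: b :: t').filter (fun p => decide (j < p))).zip ((x :: b :: t').filter (fun p => decide (j < p))).tail := by
              rw [h2]; simp [hjx, h2]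
    · cases t with
      | nil => simp [hjx]
      | cons b t' =>
        have hfx : (x :: b :: t').filter (fun p => decide (j < p)) = (b :: t').filter (fun p => decide (j < p)) := by
          simp [List.filter_cons, hjx]
        rw [hfx, List.tail_cons, List.zip_cons_cons, List.filter_cons]
        simp only [decide_eq_true_eq, if_neg hjx]
        simpa using ih ht

theorem pvInc_pairwise (s : List Char) : (pvInc s).Pairwise (· < ·) :=
  List.Pairwise.filter _ List.pairwise_lt_range

theorem pvInc_pos (s : List Char) : ∀ p ∈ pvInc s, 0 < p := by
  intro p hp
  have := (List.mem_filter.mp hp).2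
  simp [pvIsLMS] at this
  omega

theorem pvInc_lt (s : List Char) : ∀ p ∈ pvInc s, p < s.length := by
  intro p hp
  exact List.mem_range.mp (List.mem_filter.mp hp).1

-- ---------- B side ----------

theorem pvB1_step (s : List Char) (j : Nat) (h : j + 1 ≤ s.length - 1) :
    pvBStep1 s (((pvT s).drop (j+1)).dropLast.reverse, (pvT s).getD (j+1) "") ((j:Int)) =
      (((pvT s).drop j).dropLast.reverse, (pvT s).getD j "") := by
  have hlen : s.length ≥ 2 := by omega
  have hj1 : j + 1 < s.length := by omega
  have hj : j < s.length := by omega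
  have hTlen := pvT_length s
  have hchar : pvChar s ((j:Int)) = s.getD j ' ' := by
    simp [pvChar, PySem.List.pyGetD_natCast]
  have hchar1 : pvChar s ((j:Int) + 1) = s.getD (j+1) ' ' := by
    have hc : ((j:Int) + 1) = ((j+1 : Nat) : Int) := by push_cast; ring
    unfold pvChar
    rw [hc, PySem.List.pyGetD_natCast]
  have ht : (if pvChar s ((j:Int)) ≠ pvChar s ((j:Int) + 1) then
        (if pvChar s ((j:Int) + 1) < pvChar s ((j:Int)) then "L" else "S") else (pvT s).getD (j+1) "")
      = (pvT s).getD j "" := by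
    rw [pvT_getD s j hj1, hchar, hchar1]
    by_cases he : s.getD j ' ' = s.getD (j+1) ' '
    · rw [if_neg (not_not_intro he), if_pos he]
    · rw [if_pos he, if_neg he]
  have hdrop : (pvT s).drop j = (pvT s).getD j "" :: (pvT s).drop (j+1) := by
    rw [List.drop_eq_getElem_cons (by omega), List.getD_eq_getElem _ _ (by omega)]
  have hne : (pvT s).drop (j+1) ≠ [] := by
    simp [List.drop_eq_nil_iff]; omega
  simp only [pvBStep1, ht]
  refine Prod.ext ?_ rfl
  simp only [hdrop, List.dropLast_cons_of_ne_nil hne, List.reverse_cons]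

theorem pvB1_loop (s : List Char) (j : Nat) (h : j ≤ s.length - 1) :
    (PySem.List.pyRange ((j:Int) - 1) (-1) (-1)).foldl (pvBStep1 s)
      (((pvT s).drop j).dropLast.reverse, (pvT s).getD j "") =
    ((pvT s).dropLast.reverse, (pvT s).getD 0 "") := by
  induction j with
  | zero => rw [PySem.List.pyRange_neg_one_eq_nil (by omega)]; simp
  | succ j ih =>
    have hcast : ((j+1 : Nat) : Int) - 1 = (j : Int) := by push_cast; ring
    rw [hcast, PySem.List.pyRange_neg_one_cons (by omega), List.foldl_cons, pvB1_step s j h]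
    exact ih (by omega)

theorem pv_decide_and_comm (p q : Prop) [Decidable p] [Decidable q] :
    decide (p ∧ q) = (decide q && decide p) := by
  by_cases hp : p <;> by_cases hq : q <;> simp [hp, hq]

theorem pv_cast_map_succ (l : List Nat) :
    List.map (fun p : Nat => (p : Int)) (l.map Nat.succ) = l.map (fun k : Nat => 1 + (k : Int)) := by
  induction l with
  | nil => rfl
  | cons x t ih =>
    simp only [List.map_cons, ih]
    congr 1
    push_cast
    ring

-- pass 2 computes the increasing LMS list
theorem pvB2_eq (s : List Char) (hs : s ≠ []) :
    (PySem.List.pyRange 1 ((s.length : Int)) 1).foldl (pvBStep2 (pvT s)) [] = pvIncZ s := by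
  have hlen : 1 ≤ s.length := by
    cases s with | nil => exact absurd rfl hs | cons a t => simp
  have hstep : pvBStep2 (pvT s) = fun acc p =>
      if PySem.List.pyGetD (pvT s) p "" = "S" ∧ PySem.List.pyGetD (pvT s) (p - 1) "" = "L"
      then acc ++ [p] else acc := rfl
  rw [hstep, PySem.List.foldl_append_ite_eq_filter, List.nil_append, PySem.List.pyRange_one,
    List.filter_map]
  have htn : (((s.length : Int)) - 1).toNat = s.length - 1 := by omega
  have hfun : ((fun p => decide (PySem.List.pyGetD (pvT s) p "" = "S" ∧
        PySem.List.pyGetD (pvT s) (p - 1) "" = "L")) ∘ (fun k : Nat => (1 : Int) + (k : Int)))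
      = fun k : Nat => pvIsLMS s (k + 1) := by
    funext k
    have h1 : (1 : Int) + (k : Int) = ((k + 1 : Nat) : Int) := by push_cast; ring
    have h3 : ((k + 1 : Nat) : Int) - 1 = ((k : Nat) : Int) := by push_cast; ring
    simp only [Function.comp, h1, h3, PySem.List.pyGetD_natCast, pvIsLMS]
    rw [pv_decide_and_comm]
    simp only [ne_eq, Nat.add_eq_zero_iff, one_ne_zero, and_false, not_false_eq_true, decide_true,
      Bool.true_and, Nat.add_sub_cancel]
    exact Bool.and_comm _ _
  rw [htn, hfun]
  unfold pvIncZ pvInc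
  rw [show s.length = (s.length - 1) + 1 by omega, List.range_succ_eq_map, List.filter_cons]
  have h0 : pvIsLMS s 0 = false := by simp [pvIsLMS]
  rw [h0]
  simp only [Bool.false_eq_true, if_false, Nat.add_sub_cancel]
  rw [List.filter_map]
  have hp : (pvIsLMS s ∘ Nat.succ) = fun k => pvIsLMS s (k + 1) := rfl
  rw [hp, pv_cast_map_succ]

-- pass 3 invariant: inserting consecutive-pair substrings back to front
theorem pvB3_step (string : String) (L : List Int) (n : Int)
    (hsort : L.Pairwise (· < ·)) (hub : ∀ p ∈ L, p < n) (j : Nat) (hj : j + 1 ≤ L.length - 1) :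
    pvBStep3 string L
      ⟨(n - 1, "$") ::
        (((L.zip L.tail).map (fun ab => (ab.1, PySem.Str.slice string (some ab.1) (some (ab.2 + 1))))).drop (j+1)).reverse⟩
      ((j : Int)) =
    ⟨(n - 1, "$") ::
      (((L.zip L.tail).map (fun ab => (ab.1, PySem.Str.slice string (some ab.1) (some (ab.2 + 1))))).drop j).reverse⟩ := by
  set pairFn : Int × Int → Int × String :=
    fun ab => (ab.1, PySem.Str.slice string (some ab.1) (some (ab.2 + 1))) with hpairFn
  set pm := (L.zip L.tail).map pairFn with hpm
  have hk : j + 1 < L.length := by omega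
  have hj' : j < L.length := by omega
  have hzlen : (L.zip L.tail).length = L.length - 1 := by
    simp [List.length_zip, List.length_tail]
  have hpmlen : pm.length = L.length - 1 := by simp [hpm, hzlen]
  have hmono := List.pairwise_iff_getElem.mp hsort
  have htail : ∀ (m : Nat) (hm : m < L.length - 1), L.tail[m]'(by simp [List.length_tail]; omega) = L[m+1]'(by omega) := by
    intro m hm
    rw [List.getElem_tail]
  have hget : PySem.List.pyGetD L ((j : Int)) 0 = L[j] := by
    rw [PySem.List.pyGetD_natCast, List.getD_eq_getElem _ _ hj']
  have hget1 : PySem.List.pyGetD L ((j : Int) + 1) 0 = L[j+1] := by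
    rw [show (j : Int) + 1 = ((j + 1 : Nat) : Int) by push_cast; ring,
      PySem.List.pyGetD_natCast, List.getD_eq_getElem _ _ hk]
  have hfresh : PySem.Dict.contains (⟨(n - 1, "$") :: (pm.drop (j+1)).reverse⟩ : PySem.Dict Int String) (L[j]) = false := by
    rw [PySem.Dict.contains_mk]
    simp only [List.any_eq_false]
    intro q hq
    rcases List.mem_cons.mp hq with rfl | hq'
    · have h1 : L[j] < L[j+1] := hmono j (j+1) hj' hk (by omega)
      have h2 : L[j+1] < n := hub _ (List.getElem_mem hk)
      simp; omega
    · have hq'' := List.mem_reverse.mp hq'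
      obtain ⟨m, hm, rfl⟩ := List.mem_iff_getElem.mp hq''
      have hmlen : j + 1 + m < pm.length := by
        have := (List.length_drop ..) ▸ hm
        omega
      rw [List.getElem_drop]
      have hidx : j + 1 + m < L.length - 1 := by omega
      have : pm[j+1+m]'(hmlen) = pairFn (L[j+1+m]'(by omega), L[j+1+m+1]'(by omega)) := by
        simp only [hpm, List.getElem_map, List.getElem_zip]
        rw [htail (j+1+m) hidx]
      rw [this]
      have : L[j] < L[j+1+m]'(by omega) := hmono j (j+1+m) hj' (by omega) (by omega)
      simp [hpairFn]; omega
  unfold pvBStep3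
  rw [hget, hget1]
  apply PySem.Dict.ext
  rw [PySem.Dict.items_insert_of_not_contains _ _ hfresh]
  have hdrop : pm.drop j = pm[j]'(by omega) :: pm.drop (j+1) := List.drop_eq_getElem_cons (by omega)
  have hpmj : pm[j]'(by omega) = (L[j], PySem.Str.slice string (some L[j]) (some (L[j+1] + 1))) := by
    simp only [hpm, List.getElem_map, List.getElem_zip]
    rw [htail j (by omega)]
  simp only [hdrop, hpmj, List.reverse_cons]
  rfl

theorem pvB3_loop (string : String) (L : List Int) (n : Int)
    (hsort : L.Pairwise (· < ·)) (hub : ∀ p ∈ L, p < n) (j : Nat) (hj : j ≤ L.length - 1) :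
    (PySem.List.pyRange ((j : Int) - 1) (-1) (-1)).foldl (pvBStep3 string L)
      ⟨(n - 1, "$") ::
        (((L.zip L.tail).map (fun ab => (ab.1, PySem.Str.slice string (some ab.1) (some (ab.2 + 1))))).drop j).reverse⟩ =
    ⟨(n - 1, "$") ::
      ((L.zip L.tail).map (fun ab => (ab.1, PySem.Str.slice string (some ab.1) (some (ab.2 + 1))))).reverse⟩ := by
  induction j with
  | zero => rw [PySem.List.pyRange_neg_one_eq_nil (by omega)]; simp
  | succ j ih =>
    have hcast : ((j + 1 : Nat) : Int) - 1 = (j : Int) := by push_cast; ring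
    rw [hcast, PySem.List.pyRange_neg_one_cons (by omega), List.foldl_cons,
      pvB3_step string L n hsort hub j hj]
    exact ih (by omega)

theorem pv_toList_ne_nil (string : String) (h : string ≠ "") : string.toList ≠ [] := by
  intro hnil
  apply h
  have := congrArg String.ofList hnil
  simpa using this

theorem pvT_ne_nil (s : List Char) (hs : s ≠ []) : pvT s ≠ [] := by
  have := pvT_length s
  intro hn
  rw [hn] at this
  cases s with
  | nil => exact hs rfl
  | cons a t => simp at this

theorem pvT_decomp (s : List Char) (hs : s ≠ []) : (pvT s).dropLast ++ ["S"] = pvT s := by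
  have hTne := pvT_ne_nil s hs
  have hlen : 1 ≤ s.length := by cases s with | nil => exact absurd rfl hs | cons a t => simp
  conv_rhs => rw [← List.dropLast_append_getLast hTne]
  congr 1
  have hzero : 0 < (pvT s).length := by rw [pvT_length]; omega
  have e : (pvT s).getLast hTne = (pvT s).getD ((pvT s).length - 1) "" := by
    rw [List.getD_eq_getElem _ _ (by omega), List.getLast_eq_getElem]
  rw [e, pvT_length, pvT_last s hs]

theorem pvIncZ_pairwise (s : List Char) : (pvIncZ s).Pairwise (· < ·) := by
  refine List.Pairwise.map _ ?_ (pvInc_pairwise s)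
  intro a b hab
  exact_mod_cast hab

theorem pvIncZ_lt (s : List Char) : ∀ p ∈ pvIncZ s, p < (s.length : Int) := by
  intro p hp
  obtain ⟨q, hq, rfl⟩ := List.mem_map.mp hp
  exact_mod_cast pvInc_lt s q hq

theorem pvB_eq_canon (string : String) (h : string ≠ "") :
    get_types_and_lms_characters_alt string = pvCanon string := by
  have hs : string.toList ≠ [] := pv_toList_ne_nil string h
  have hlen : 1 ≤ string.toList.length := by
    cases hsl : string.toList with
    | nil => exact absurd hsl hs
    | cons a t => simp
  set s := string.toList with hsdef
  have hTlen := pvT_length s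
  -- pass 1
  have e1 : (PySem.List.pyRange ((s.length : Int) - 2) (-1) (-1)).foldl (pvBStep1 s) ([], "S")
      = ((pvT s).dropLast.reverse, (pvT s).getD 0 "") := by
    have hb : (s.length : Int) - 2 = ((s.length - 1 : Nat) : Int) - 1 := by omega
    have hinit : ((([] : List String), ("S" : String)))
        = (((pvT s).drop (s.length - 1)).dropLast.reverse, (pvT s).getD (s.length - 1) "") := by
      have hd : ((pvT s).drop (s.length - 1)).length = 1 := by
        rw [List.length_drop, hTlen]; omega
      have hdl : ((pvT s).drop (s.length - 1)).dropLast = [] := by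
        cases hx : (pvT s).drop (s.length - 1) with
        | nil => rfl
        | cons a t =>
          rw [hx] at hd
          simp at hd
          simp [hd]
      rw [hdl, pvT_last s hs]
      rfl
    rw [hb, hinit]
    exact pvB1_loop s (s.length - 1) (le_refl _)
  -- the types list is pvT s
  have e2 : (if (s.length : Int) ≠ 0 then (pvT s).dropLast.reverse.reverse ++ ["S"] else [])
      = pvT s := by
    rw [if_pos (by omega : (s.length : Int) ≠ 0), List.reverse_reverse, pvT_decomp s hs]
  simp only [get_types_and_lms_characters_alt, ← hsdef, e1, e2, pvB2_eq s hs]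
  -- pass 3
  have hsortZ := pvIncZ_pairwise s
  have hubZ := pvIncZ_lt s
  unfold pvCanon pvPairs
  rw [← hsdef]
  refine congrArg (fun x => (pvT s, (pvIncZ s).reverse, x)) ?_
  by_cases hk : (pvIncZ s).length = 0
  · have hLnil : pvIncZ s = [] := List.eq_nil_of_length_eq_zero hk
    rw [hLnil]
    rw [show ((([] : List Int).length : Int) - 2 : Int) = -2 by simp]
    rw [PySem.List.pyRange_neg_one_eq_nil (by omega)]
    simp only [List.foldl_nil, List.zip_nil_left, List.map_nil, List.reverse_nil]
    rfl
  · have hk1 : 1 ≤ (pvIncZ s).length := by omega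
    have hb3 : ((pvIncZ s).length : Int) - 2 = (((pvIncZ s).length - 1 : Nat) : Int) - 1 := by omega
    have hpm : (((pvIncZ s).zip (pvIncZ s).tail).map
        (fun ab => (ab.1, PySem.Str.slice string (some ab.1) (some (ab.2 + 1))))).drop ((pvIncZ s).length - 1) = [] := by
      apply List.drop_eq_nil_of_le
      simp [List.length_zip, List.length_tail]
    have hinit3 : (PySem.Dict.ofList [(((s.length : Int)) - 1, "$")] : PySem.Dict Int String)
        = ⟨((s.length : Int) - 1, "$") ::
            ((((pvIncZ s).zip (pvIncZ s).tail).map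
              (fun ab => (ab.1, PySem.Str.slice string (some ab.1) (some (ab.2 + 1))))).drop ((pvIncZ s).length - 1)).reverse⟩ := by
      rw [hpm]
      rfl
    rw [hb3, hinit3, pvB3_loop string (pvIncZ s) ((s.length : Int)) hsortZ hubZ ((pvIncZ s).length - 1) (le_refl _)]


-- ---------- A side ----------

-- the pair function producing a dict entry from consecutive LMS positions
def pvPairFnN (string : String) (ab : Nat × Nat) : Int × String :=
  ((ab.1 : Int), PySem.Str.slice string (some ((ab.1 : Int))) (some ((ab.2 : Int) + 1)))

-- A's loop state after all indices ≥ j have been processed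
def pvATypes (s : List Char) (j : Nat) : List String := List.replicate j "" ++ (pvT s).drop j
def pvALms (s : List Char) (j : Nat) : List Int :=
  (((pvInc s).filter (fun p => decide (j < p))).map (fun p : Nat => (p : Int))).reverse
def pvAItems (string : String) (j : Nat) : List (Int × String) :=
  ((string.toList.length : Int) - 1, "$") ::
    (((((pvInc string.toList).zip (pvInc string.toList).tail).filter
        (fun ab => decide (j < ab.1))).map (pvPairFnN string)).reverse)
def pvAState (string : String) (j : Nat) : List String × List Int × PySem.Dict Int String :=
  (pvATypes string.toList j, pvALms string.toList j, ⟨pvAItems string j⟩)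

theorem pv_pyGetD_last (xs : List Int) (x : Int) : PySem.List.pyGetD (xs ++ [x]) (-1) 0 = x := by
  simp [PySem.List.pyGetD]

theorem pv_pyGetD_penult (xs : List Int) (a b : Int) :
    PySem.List.pyGetD (xs ++ [a, b]) (-2) 0 = a := by
  unfold PySem.List.pyGetD
  rw [PySem.List.pyGet?_neg_ofNat _ 2 (by omega) (by simp)]
  have hl : (xs ++ [a, b]).length - 2 = xs.length := by simp
  rw [hl, List.getElem?_append_right (le_refl _)]
  simp

theorem pv_getD_pvATypes (s : List Char) (j m : Nat) (hj : j ≤ m) (_hm : m < s.length) :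
    (pvATypes s j).getD m "" = (pvT s).getD m "" := by
  have hTlen := pvT_length s
  unfold pvATypes
  rw [List.getD, List.getElem?_append_right (by simp; omega), List.length_replicate,
    List.getElem?_drop, show j + (m - j) = m by omega]
  rfl

theorem pvA_step (string : String) (j : Nat) (hj : j + 1 ≤ string.toList.length - 1) :
    pvAStep string (pvAState string (j + 1)) ((j : Int)) = pvAState string j := by
  unfold pvAStep
  simp only [pvAState]
  set s := string.toList with hsdef
  have hTlen := pvT_length s
  have hj1 : j + 1 < s.length := by omega
  have hchar : pvChar s ((j : Int)) = s.getD j ' ' := by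
    simp [pvChar, PySem.List.pyGetD_natCast]
  have hchar1 : pvChar s ((j : Int) + 1) = s.getD (j + 1) ' ' := by
    have hc : ((j : Int) + 1) = ((j + 1 : Nat) : Int) := by push_cast; ring
    unfold pvChar
    rw [hc, PySem.List.pyGetD_natCast]
  -- the type written at index j
  have hread1 : PySem.List.pyGetD (pvATypes s (j + 1)) ((j : Int) + 1) "" = (pvT s).getD (j + 1) "" := by
    rw [show ((j : Int) + 1) = ((j + 1 : Nat) : Int) by push_cast; ring, PySem.List.pyGetD_natCast]
    exact pv_getD_pvATypes s (j + 1) (j + 1) (le_refl _) hj1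
  have hti : (if pvChar s ((j : Int)) = pvChar s ((j : Int) + 1)
        then PySem.List.pyGetD (pvATypes s (j + 1)) ((j : Int) + 1) ""
        else if pvChar s ((j : Int) + 1) < pvChar s ((j : Int)) then "L" else "S")
      = (pvT s).getD j "" := by
    rw [hread1, pvT_getD s j hj1, hchar, hchar1]
  -- setting index j turns stage-(j+1) types into stage-j types
  have hset : pySet (pvATypes s (j + 1)) ((j : Int)) ((pvT s).getD j "") = pvATypes s j := by
    unfold pySet pvATypes
    rw [if_neg (by omega), Int.toNat_natCast, List.replicate_succ', List.append_assoc,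
      List.set_append_right _ _ (by simp), List.length_replicate, Nat.sub_self]
    show List.replicate j "" ++ ((pvT s).getD j "" :: (pvT s).drop (j + 1)) = _
    rw [List.getD_eq_getElem _ _ (by omega), ← List.drop_eq_getElem_cons (by omega)]
  -- the LMS test at this step is pvIsLMS (j+1)
  have hcondL : PySem.List.pyGetD (pvATypes s j) ((j : Int)) "" = (pvT s).getD j "" := by
    rw [PySem.List.pyGetD_natCast]
    exact pv_getD_pvATypes s j j (le_refl _) (by omega)
  have hcondS : PySem.List.pyGetD (pvATypes s j) ((j : Int) + 1) "" = (pvT s).getD (j + 1) "" := by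
    rw [show ((j : Int) + 1) = ((j + 1 : Nat) : Int) by push_cast; ring, PySem.List.pyGetD_natCast]
    exact pv_getD_pvATypes s j (j + 1) (by omega) hj1
  have hsorted := pvInc_pairwise s
  rw [hti, hset, hcondL, hcondS]
  by_cases hC : (pvT s).getD j "" = "L" ∧ (pvT s).getD (j + 1) "" = "S"
  · -- j+1 is an LMS position
    have hlms : pvIsLMS s (j + 1) = true := by
      simp only [pvIsLMS, Nat.add_sub_cancel, hC.1, hC.2]
      simp
    have hmem : (j + 1) ∈ pvInc s :=
      List.mem_filter.mpr ⟨List.mem_range.mpr (by omega), hlms⟩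
    have hfj := filter_step_mem (pvInc s) j hsorted hmem
    have hlmsStep : pvALms s (j + 1) ++ [(j : Int) + 1] = pvALms s j := by
      unfold pvALms
      rw [hfj]
      simp only [List.map_cons, List.reverse_cons]
      push_cast
      rfl
    rw [if_pos hC]
    rcases hF : (pvInc s).filter (fun p => decide (j + 1 < p)) with _ | ⟨b, F'⟩
    · -- no LMS above j+1 : nothing is inserted
      have hlen1 : (pvALms s (j + 1) ++ [(j : Int) + 1]).length = 1 := by
        unfold pvALms
        rw [hF]
        simp
      have hz1 : ((pvInc s).zip (pvInc s).tail).filter (fun ab => decide (j < ab.1)) = [] := by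
        rw [zip_filter_fst _ _ hsorted, hfj, hF]
        rfl
      have hz2 : ((pvInc s).zip (pvInc s).tail).filter (fun ab => decide (j + 1 < ab.1)) = [] := by
        rw [zip_filter_fst _ _ hsorted, hF]
        rfl
      have hd : (⟨pvAItems string (j + 1)⟩ : PySem.Dict Int String) = ⟨pvAItems string j⟩ := by
        unfold pvAItems
        rw [← hsdef, hz1, hz2]
      rw [if_neg (by rw [hlen1]; omega), hlmsStep, hd]
    · -- the next LMS above j+1 is b : insert the pair substring
      have hblt : j + 1 < b := by
        have : b ∈ (pvInc s).filter (fun p => decide (j + 1 < p)) := by rw [hF]; simp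
        simpa using (List.mem_filter.mp this).2
      have hbn : b < s.length := pvInc_lt s b (by
        have : b ∈ (pvInc s).filter (fun p => decide (j + 1 < p)) := by rw [hF]; simp
        exact (List.mem_filter.mp this).1)
      have hlen2 : 1 < (pvALms s (j + 1) ++ [(j : Int) + 1]).length := by
        unfold pvALms
        rw [hF]
        simp
      have htailShape : pvALms s (j + 1) = ((F'.map (fun p : Nat => (p : Int))).reverse) ++ [(b : Int)] := by
        unfold pvALms
        rw [hF]
        simp
      have hgetLast : PySem.List.pyGetD (pvALms s (j + 1) ++ [(j : Int) + 1]) (-1) 0 = (j : Int) + 1 :=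
        pv_pyGetD_last _ _
      have hgetPen : PySem.List.pyGetD (pvALms s (j + 1) ++ [(j : Int) + 1]) (-2) 0 = (b : Int) := by
        rw [htailShape, List.append_assoc]
        exact pv_pyGetD_penult _ _ _
      have hz1 : ((pvInc s).zip (pvInc s).tail).filter (fun ab => decide (j < ab.1))
          = (j + 1, b) :: ((pvInc s).zip (pvInc s).tail).filter (fun ab => decide (j + 1 < ab.1)) := by
        rw [zip_filter_fst _ _ hsorted, zip_filter_fst _ _ hsorted, hfj, hF]
        rfl
      have hfresh : PySem.Dict.contains (⟨pvAItems string (j + 1)⟩ : PySem.Dict Int String) ((j : Int) + 1) = false := by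
        rw [PySem.Dict.contains_mk]
        simp only [List.any_eq_false]
        intro q hq
        unfold pvAItems at hq
        rw [← hsdef] at hq
        rcases List.mem_cons.mp hq with rfl | hq'
        · simp
          omega
        · obtain ⟨ab, hab, rfl⟩ := List.mem_map.mp (List.mem_reverse.mp hq')
          have h1 : j + 1 < ab.1 := by simpa using (List.mem_filter.mp hab).2
          simp [pvPairFnN]
          omega
      have hd : PySem.Dict.insert (⟨pvAItems string (j + 1)⟩ : PySem.Dict Int String) ((j : Int) + 1)
            (PySem.Str.slice string (some ((j : Int) + 1)) (some ((b : Int) + 1)))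
          = ⟨pvAItems string j⟩ := by
        apply PySem.Dict.ext
        rw [PySem.Dict.items_insert_of_not_contains _ _ hfresh]
        show pvAItems string (j + 1) ++ [((j : Int) + 1, _)] = _
        unfold pvAItems
        rw [← hsdef, hz1]
        simp only [List.map_cons, List.reverse_cons, List.cons_append]
        have hpf : pvPairFnN string (j + 1, b)
            = ((j : Int) + 1, PySem.Str.slice string (some ((j : Int) + 1)) (some ((b : Int) + 1))) := by
          unfold pvPairFnN
          push_cast
          rfl
        rw [hpf]
      rw [if_pos hlen2, hgetLast, hgetPen, hlmsStep, hd]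
  · -- j+1 is not an LMS position
    have hlms : pvIsLMS s (j + 1) = false := by
      unfold pvIsLMS
      rw [Nat.add_sub_cancel]
      rcases not_and_or.mp hC with hx | hx
      · rw [decide_eq_false hx]
        simp
      · rw [decide_eq_false hx]
        simp
    have hnmem : (j + 1) ∉ pvInc s := fun hmem => by
      have := (List.mem_filter.mp hmem).2
      rw [hlms] at this
      exact Bool.false_ne_true this
    have hfj := filter_step_not_mem (pvInc s) j hnmem
    have hl : pvALms s (j + 1) = pvALms s j := by
      unfold pvALms
      rw [hfj]
    have hd : (⟨pvAItems string (j + 1)⟩ : PySem.Dict Int String) = ⟨pvAItems string j⟩ := by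
      unfold pvAItems
      rw [← hsdef, zip_filter_fst _ _ hsorted, zip_filter_fst _ _ hsorted, hfj]
    rw [if_neg hC, hl, hd]

theorem pvA_loop (string : String) (j : Nat) (hj : j ≤ string.toList.length - 1) :
    (PySem.List.pyRange ((j : Int) - 1) (-1) (-1)).foldl (pvAStep string) (pvAState string j)
      = pvAState string 0 := by
  induction j with
  | zero => rw [PySem.List.pyRange_neg_one_eq_nil (by omega)]; simp
  | succ j ih =>
    have hcast : ((j + 1 : Nat) : Int) - 1 = (j : Int) := by push_cast; ring
    rw [hcast, PySem.List.pyRange_neg_one_cons (by omega), List.foldl_cons, pvA_step string j hj]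
    exact ih (by omega)

theorem pv_pairs_eq (string : String) :
    pvPairs string = ((pvInc string.toList).zip (pvInc string.toList).tail).map (pvPairFnN string) := by
  unfold pvPairs pvIncZ
  rw [← List.map_tail, List.zip_map, List.map_map]
  rfl

theorem pvA_eq_canon (string : String) (h : string ≠ "") :
    get_types_and_lms_characters string = pvCanon string := by
  have hs : string.toList ≠ [] := pv_toList_ne_nil string h
  have hlen : 1 ≤ string.toList.length := by
    cases hsl : string.toList with
    | nil => exact absurd hsl hs
    | cons a t => simp
  set s := string.toList with hsdef
  have hTlen := pvT_length s
  have hsorted := pvInc_pairwise s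
  obtain ⟨m, hm⟩ : ∃ m, s.length = m + 1 := ⟨s.length - 1, by omega⟩
  -- the state before the loop is the stage-m state
  have einit : ((pySet (PySem.List.pyRepeat [""] ((s.length : Int))) (-1) "S", ([] : List Int),
      (PySem.Dict.ofList [((s.length : Int) - 1, "$")] : PySem.Dict Int String)))
      = pvAState string m := by
    have h1 : pySet (PySem.List.pyRepeat [""] ((s.length : Int))) (-1) "S" = pvATypes s m := by
      rw [PySem.List.pyRepeat_singleton, Int.toNat_natCast]
      unfold pySet
      rw [if_pos (by omega)]
      norm_num
      have hdrop : (pvT s).drop m = ["S"] := by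
        rw [List.drop_eq_getElem_cons (by omega)]
        have hnil : (pvT s).drop (m + 1) = [] := List.drop_eq_nil_of_le (by omega)
        rw [hnil]
        have hS : (pvT s)[m] = "S" := by
          rw [← List.getD_eq_getElem _ "" (by omega), ← show s.length - 1 = m by omega, pvT_last s hs]
        rw [hS]
      unfold pvATypes
      rw [hdrop, hm, List.replicate_succ', List.set_append_right _ _ (by simp),
        List.length_replicate, show m + 1 - 1 - m = 0 by omega, List.set_cons_zero]
    have h2 : ([] : List Int) = pvALms s m := by
      unfold pvALms
      rw [List.filter_eq_nil_iff.mpr]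
      · rfl
      · intro p hp
        have hplt := pvInc_lt s p hp
        rw [hm] at hplt
        simp
        omega
    have h3 : (PySem.Dict.ofList [((s.length : Int) - 1, "$")] : PySem.Dict Int String)
        = ⟨pvAItems string m⟩ := by
      have hz : ((pvInc s).zip (pvInc s).tail).filter (fun ab => decide (m < ab.1)) = [] := by
        rw [List.filter_eq_nil_iff.mpr]
        intro ab hab
        have h1 := zip_tail_lt (pvInc s) hsorted ab hab
        have h2 := pvInc_lt s ab.2 (List.mem_of_mem_tail (List.of_mem_zip hab).2)
        rw [hm] at h2
        simp
        omega
      unfold pvAItems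
      rw [← hsdef, hz]
      rfl
    unfold pvAState
    rw [← hsdef, h1, ← h2, h3]
  simp only [get_types_and_lms_characters, ← hsdef]
  rw [show (s.length : Int) - 2 = ((m : Nat) : Int) - 1 by omega, einit,
    pvA_loop string m (by rw [← hsdef]; omega)]
  -- project the final state
  have efin1 : pvATypes s 0 = pvT s := by
    unfold pvATypes
    simp
  have efin2 : pvALms s 0 = (pvIncZ s).reverse := by
    unfold pvALms pvIncZ
    rw [List.filter_eq_self.mpr]
    intro p hp
    have := pvInc_pos s p hp
    simpa using this
  have efin3 : pvAItems string 0 = ((s.length : Int) - 1, "$") :: (pvPairs string).reverse := by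
    unfold pvAItems
    rw [← hsdef, List.filter_eq_self.mpr, pv_pairs_eq, ← hsdef]
    intro ab hab
    have := pvInc_pos s ab.1 (List.of_mem_zip hab).1
    simpa using this
  simp only [pvAState, pvCanon, ← hsdef, efin1, efin2]
  exact congrArg (fun x => (pvT s, (pvIncZ s).reverse, x)) efin3


-- ===== VERDICT (by name: the statement is the Claim_ definition above) =====
theorem get_types_and_lms_characters_spec : Claim_equal_get_types_and_lms_characters := by
  intro string _ hpre
  unfold Spec_get_types_and_lms_characters
  rw [pvA_eq_canon string hpre, pvB_eq_canon string hpre]
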